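-- pv_equiv track=rewrite | github.com/PID1381/downloadcenter | scripts/anime/anime_engine_prima.py | parse_episode_selection
-- ===== SOURCE A (Python) =====
-- from typing import Dict, List, Optional, Set, Tuple
--
-- def parse_episode_selection(text: str, max_ep: int) -> List[int]:
--     """
--     Parser selezione episodi da stringa utente -> indici 0-based.
--
--     Formati supportati:
--       tutto / all / *      -> tutti [0 .. max_ep-1]
--       1-5                  -> range [0,1,2,3,4]
--       1,3,7                -> singoli [0,2,6]
--       1-5,7,9              -> misto [0,1,2,3,4,6,8]
--       numeri fuori range   -> ignorati silenziosamente
--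
--     Ritorna lista indici 0-based, ordinata, senza duplicati.
--     Usata da: estrai_link_anime.
--     """
--     text = text.strip().lower()
--     if not text or text in ("tutto", "all", "tutti", "*"):
--         return list(range(max_ep))
--
--     indices: Set[int] = set()
--     for part in text.replace(" ", "").split(","):
--         part = part.strip()
--         if not part:
--             continue
--         if "-" in part:
--             try:
--                 a_s, b_s = part.split("-", 1)
--                 a = max(0, int(a_s) - 1)
--                 b = min(max_ep - 1, int(b_s) - 1)
--                 if a <= b:
--                     indices.update(range(a, b + 1))
--             except (ValueError, TypeError):
--                 pass
--         elif part.isdigit():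
--             idx = int(part) - 1
--             if 0 <= idx < max_ep:
--                 indices.add(idx)
--
--     return sorted(indices)
-- ===== SOURCE B (Python) =====
-- def _part_interval(part, max_ep):
--     """Interval (a, b) of 0-based indices selected by one comma-piece, or None."""
--     if not part:
--         return None
--     if "-" in part:
--         a_s, b_s = part.split("-", 1)
--         try:
--             a = max(0, int(a_s) - 1)
--             b = min(max_ep - 1, int(b_s) - 1)
--         except ValueError:
--             return None
--         return (a, b) if a <= b else None
--     if part.isdigit():
--         idx = int(part) - 1
--         if 0 <= idx < max_ep:
--             return (idx, idx)
--     return None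
--
--
-- def parse_episode_selection(text, max_ep):
--     text = text.strip().lower()
--     if not text or text in ("tutto", "all", "tutti", "*"):
--         return list(range(max_ep))
--
--     intervals = []
--     for part in text.replace(" ", "").split(","):
--         iv = _part_interval(part.strip(), max_ep)
--         if iv is not None:
--             intervals.append(iv)
--
--     out = []
--     prev = -1
--     for a, b in sorted(intervals, key=lambda iv: iv[0]):
--         out.extend(range(max(a, prev + 1), b + 1))
--         prev = max(prev, b)
--     return out
-- ===== Notes on version B (the rewrite author's own statement) =====
-- stated objective: alternative
-- what changed: Replaces A's element-by-element set accumulation plus final sort with an interval parser: each comma piece yields one clamped interval, the interval list is sorted by start and swept left-to-right emitting each union segment once, so no per-element set and no sort over the selected indices.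
import Mathlib
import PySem

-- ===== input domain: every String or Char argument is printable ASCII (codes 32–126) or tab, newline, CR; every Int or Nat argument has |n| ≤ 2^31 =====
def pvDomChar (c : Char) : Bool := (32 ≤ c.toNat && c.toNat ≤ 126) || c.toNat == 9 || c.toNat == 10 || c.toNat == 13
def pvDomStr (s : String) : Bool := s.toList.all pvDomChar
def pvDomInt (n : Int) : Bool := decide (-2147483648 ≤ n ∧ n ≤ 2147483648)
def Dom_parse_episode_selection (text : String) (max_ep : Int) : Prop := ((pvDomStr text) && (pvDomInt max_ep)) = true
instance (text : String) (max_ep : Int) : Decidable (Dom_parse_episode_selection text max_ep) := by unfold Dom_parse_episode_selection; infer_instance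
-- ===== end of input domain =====

-- B replaces A's per-index set accumulation + final sort by clamped intervals sorted by
-- start and a left-to-right union sweep (objective: alternative algorithm, similar cost).

-- ===== PORT A =====
-- loop body of A's 'for part in ...' (named helper; a literal transliteration of the body)
def pvStepA (max_ep : Int) (acc : PySem.Set Int) (part : String) : PySem.Set Int :=
  let p := PySem.Str.strip part
  if p = "" then acc
  else if PySem.Str.isIn "-" p then
    match (PySem.Str.splitMax? p "-" 1).getD [] with   -- sep "-" ≠ "": never none
    | [a_s, b_s] =>
      match PySem.Int.ofStr? a_s with
      | none => acc                                    -- int() ValueError caught: pass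
      | some av =>
        let a := max 0 (av - 1)
        match PySem.Int.ofStr? b_s with
        | none => acc                                  -- int() ValueError caught: pass
        | some bv =>
          let b := min (max_ep - 1) (bv - 1)
          if a ≤ b then PySem.Set.update acc (PySem.List.pyRange a (b + 1) 1) else acc
    | _ => acc                                         -- unpacking ValueError caught (unreachable)
  else if PySem.Str.strIsdigit p then
    match PySem.Int.ofStr? p with
    | some v =>
      let idx := v - 1
      if 0 ≤ idx ∧ idx < max_ep then PySem.Set.add acc idx else acc
    | none => acc                                      -- unreachable: isdigit ⇒ int() succeeds
  else acc

def parse_episode_selection (text : String) (max_ep : Int) : List Int :=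
  let t := PySem.Str.lower (PySem.Str.strip text)
  if t = "" ∨ t ∈ (["tutto", "all", "tutti", "*"] : List String) then
    PySem.List.pyRange 0 max_ep 1
  else
    let parts := (PySem.Str.split? (PySem.Str.replace t " " "") ",").getD []  -- sep "," ≠ "": never none
    let indices := parts.foldl (pvStepA max_ep) PySem.Set.empty
    PySem.List.sorted indices (fun x => x) false

-- ===== PORT B =====
-- B's helper _part_interval
def pvPartInterval (part : String) (max_ep : Int) : Option (Int × Int) :=
  if part = "" then none
  else if PySem.Str.isIn "-" part then
    match (PySem.Str.splitMax? part "-" 1).getD [] with  -- sep "-" ≠ "": never none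
    | [a_s, b_s] =>
      match PySem.Int.ofStr? a_s with
      | none => none                                     -- int() ValueError: return None
      | some av =>
        let a := max 0 (av - 1)
        match PySem.Int.ofStr? b_s with
        | none => none
        | some bv =>
          let b := min (max_ep - 1) (bv - 1)
          if a ≤ b then some (a, b) else none
    | _ => none
  else if PySem.Str.strIsdigit part then
    match PySem.Int.ofStr? part with
    | some v => if 0 ≤ v - 1 ∧ v - 1 < max_ep then some (v - 1, v - 1) else none
    | none => none                                       -- unreachable: isdigit ⇒ int() succeeds
  else none

def parse_episode_selection_alt (text : String) (max_ep : Int) : List Int :=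
  let t := PySem.Str.lower (PySem.Str.strip text)
  if t = "" ∨ t ∈ (["tutto", "all", "tutti", "*"] : List String) then
    PySem.List.pyRange 0 max_ep 1
  else
    let parts := (PySem.Str.split? (PySem.Str.replace t " " "") ",").getD []  -- sep "," ≠ "": never none
    let intervals := parts.foldl (fun acc part =>
      match pvPartInterval (PySem.Str.strip part) max_ep with
      | some iv => acc ++ [iv]
      | none => acc) ([] : List (Int × Int))
    let ivs := PySem.List.sorted intervals (fun iv => iv.1) false
    (ivs.foldl (fun (st : List Int × Int) iv =>
        (st.1 ++ PySem.List.pyRange (max iv.1 (st.2 + 1)) (iv.2 + 1) 1, max st.2 iv.2))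
      (([] : List Int), -1)).1

-- ===== PRECONDITION & SPEC =====
def Spec_parse_episode_selection (text : String) (max_ep : Int) (out : List Int) : Prop := out = parse_episode_selection_alt text max_ep
instance (text : String) (max_ep : Int) (out : List Int) : Decidable (Spec_parse_episode_selection text max_ep out) := by unfold Spec_parse_episode_selection; infer_instance

-- ===== CLAIM (what is proved, stated in full; the proofs are below) =====
def Claim_equal_parse_episode_selection : Prop := ∀ (text : String) (max_ep : Int), Dom_parse_episode_selection text max_ep → Spec_parse_episode_selection text max_ep (parse_episode_selection text max_ep)

-- ===== LEMMAS AND PROOFS =====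

-- A's loop body, expressed through B's part parser
set_option maxHeartbeats 1000000 in
theorem pvStepA_eq (max_ep : Int) (acc : PySem.Set Int) (part : String) :
    pvStepA max_ep acc part =
      match pvPartInterval (PySem.Str.strip part) max_ep with
      | some iv => PySem.Set.update acc (PySem.List.pyRange iv.1 (iv.2 + 1) 1)
      | none => acc := by
  unfold pvStepA pvPartInterval
  dsimp only
  by_cases h1 : PySem.Str.strip part = ""
  · rw [if_pos h1, if_pos h1]
  · rw [if_neg h1, if_neg h1]
    by_cases h2 : PySem.Str.isIn "-" (PySem.Str.strip part) = true
    · rw [if_pos h2, if_pos h2]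
      rcases hm : (PySem.Str.splitMax? (PySem.Str.strip part) "-" 1).getD [] with
          _ | ⟨a_s, _ | ⟨b_s, _ | _⟩⟩ <;> dsimp only <;> try rfl
      rcases ha : PySem.Int.ofStr? a_s with _ | av <;> dsimp only <;> try rfl
      rcases hb : PySem.Int.ofStr? b_s with _ | bv <;> dsimp only <;> try rfl
      by_cases hab : max 0 (av - 1) ≤ min (max_ep - 1) (bv - 1)
      · rw [if_pos hab, if_pos hab]
      · rw [if_neg hab, if_neg hab]
    · rw [if_neg h2, if_neg h2]
      by_cases h3 : PySem.Str.strIsdigit (PySem.Str.strip part) = true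
      · rw [if_pos h3, if_pos h3]
        rcases hv : PySem.Int.ofStr? (PySem.Str.strip part) with _ | v <;> dsimp only <;> try rfl
        by_cases hr : 0 ≤ v - 1 ∧ v - 1 < max_ep
        · rw [if_pos hr, if_pos hr]
          dsimp only
          rw [PySem.List.pyRange_one_singleton, PySem.Set.update_cons, PySem.Set.update_nil]
        · rw [if_neg hr, if_neg hr]
      · rw [if_neg h3, if_neg h3]

theorem pvPartInterval_wf (part : String) (max_ep : Int) (a b : Int)
    (h : pvPartInterval part max_ep = some (a, b)) : 0 ≤ a ∧ a ≤ b := by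
  unfold pvPartInterval at h
  by_cases h1 : part = ""
  · rw [if_pos h1] at h; exact absurd h (by simp)
  · rw [if_neg h1] at h
    by_cases h2 : PySem.Str.isIn "-" part = true
    · rw [if_pos h2] at h
      rcases hm : (PySem.Str.splitMax? part "-" 1).getD [] with _ | ⟨a_s, _ | ⟨b_s, _ | _⟩⟩ <;>
        rw [hm] at h <;> dsimp only at h
      · exact absurd h (by simp)
      · exact absurd h (by simp)
      · rcases ha : PySem.Int.ofStr? a_s with _ | av <;> rw [ha] at h <;> dsimp only at h
        · exact absurd h (by simp)
        · rcases hb : PySem.Int.ofStr? b_s with _ | bv <;> rw [hb] at h <;> dsimp only at h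
          · exact absurd h (by simp)
          · split_ifs at h with hab
            simp only [Option.some.injEq, Prod.mk.injEq] at h
            obtain ⟨rfl, rfl⟩ := h
            omega
      · exact absurd h (by simp)
    · rw [if_neg h2] at h
      by_cases h3 : PySem.Str.strIsdigit part = true
      · rw [if_pos h3] at h
        rcases hv : PySem.Int.ofStr? part with _ | v <;> rw [hv] at h <;> dsimp only at h
        · exact absurd h (by simp)
        · split_ifs at h with hr
          simp only [Option.some.injEq, Prod.mk.injEq] at h
          obtain ⟨rfl, rfl⟩ := h
          omega
      · rw [if_neg h3] at h; exact absurd h (by simp)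

-- parallel accumulation: A's set contains exactly the indices covered by B's intervals
theorem pvAccum_inv (max_ep : Int) : ∀ (parts : List String) (s : PySem.Set Int) (L : List (Int × Int)),
    s.Nodup →
    (∀ x, x ∈ s ↔ ∃ p, p ∈ L ∧ p.1 ≤ x ∧ x ≤ p.2) →
    (∀ p ∈ L, 0 ≤ p.1 ∧ p.1 ≤ p.2) →
    (parts.foldl (pvStepA max_ep) s).Nodup ∧
    (∀ x, x ∈ parts.foldl (pvStepA max_ep) s ↔
      ∃ p, p ∈ parts.foldl (fun acc part =>
          match pvPartInterval (PySem.Str.strip part) max_ep with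
          | some iv => acc ++ [iv]
          | none => acc) L ∧ p.1 ≤ x ∧ x ≤ p.2) ∧
    (∀ p ∈ parts.foldl (fun acc part =>
          match pvPartInterval (PySem.Str.strip part) max_ep with
          | some iv => acc ++ [iv]
          | none => acc) L, 0 ≤ p.1 ∧ p.1 ≤ p.2) := by
  intro parts
  induction parts with
  | nil => intro s L hnd hmem hwf; exact ⟨hnd, hmem, hwf⟩
  | cons part parts ih =>
    intro s L hnd hmem hwf
    simp only [List.foldl_cons]
    rw [pvStepA_eq]
    rcases h : pvPartInterval (PySem.Str.strip part) max_ep with _ | ⟨a, b⟩ <;> dsimp only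
    · exact ih s L hnd hmem hwf
    · obtain ⟨ha0, hab⟩ := pvPartInterval_wf _ _ _ _ h
      apply ih
      · exact PySem.Set.nodup_update _ _ hnd
      · intro x
        rw [PySem.Set.mem_update]
        constructor
        · rintro (hx | hx)
          · obtain ⟨p, hp, h1, h2⟩ := (hmem x).1 hx
            exact ⟨p, List.mem_append_left _ hp, h1, h2⟩
          · rw [PySem.List.mem_pyRange_one] at hx
            exact ⟨(a, b), List.mem_append_right _ (List.mem_singleton.2 rfl), by omega, by omega⟩
        · rintro ⟨p, hp, h1, h2⟩
          rcases List.mem_append.1 hp with hp | hp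
          · exact Or.inl ((hmem x).2 ⟨p, hp, h1, h2⟩)
          · rcases List.mem_singleton.1 hp with rfl
            exact Or.inr (PySem.List.mem_pyRange_one.mpr ⟨h1, by omega⟩)
      · intro p hp
        rcases List.mem_append.1 hp with hp | hp
        · exact hwf p hp
        · rcases List.mem_singleton.1 hp with rfl
          exact ⟨ha0, hab⟩

-- the sweep over start-sorted intervals emits the union, strictly increasing
theorem pvSweep_inv : ∀ (M K : List (Int × Int)) (out : List Int) (prev : Int),
    out.Pairwise (· < ·) →
    (∀ x ∈ out, x ≤ prev) →
    (∀ x, x ∈ out ↔ ∃ p, p ∈ K ∧ p.1 ≤ x ∧ x ≤ p.2) →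
    (∀ p ∈ K, p.2 ≤ prev) →
    (prev = -1 ∨ ∃ p, p ∈ K ∧ p.2 = prev) →
    (∀ p ∈ K, ∀ q ∈ M, p.1 ≤ q.1) →
    M.Pairwise (fun p q => p.1 ≤ q.1) →
    (∀ p ∈ M, 0 ≤ p.1 ∧ p.1 ≤ p.2) →
    (M.foldl (fun (st : List Int × Int) iv =>
        (st.1 ++ PySem.List.pyRange (max iv.1 (st.2 + 1)) (iv.2 + 1) 1, max st.2 iv.2))
      (out, prev)).1.Pairwise (· < ·) ∧
    (∀ x, x ∈ (M.foldl (fun (st : List Int × Int) iv =>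
        (st.1 ++ PySem.List.pyRange (max iv.1 (st.2 + 1)) (iv.2 + 1) 1, max st.2 iv.2))
      (out, prev)).1 ↔ ∃ p, p ∈ K ++ M ∧ p.1 ≤ x ∧ x ≤ p.2) := by
  intro M
  induction M with
  | nil =>
    intro K out prev h1 h2 h3 h4 h5 h6 h7 h8
    simp only [List.foldl_nil]
    refine ⟨h1, fun x => ?_⟩
    rw [h3 x]
    simp
  | cons iv M ih =>
    obtain ⟨a, b⟩ := iv
    intro K out prev h1 h2 h3 h4 h5 h6 h7 h8
    have hab : 0 ≤ a ∧ a ≤ b := h8 (a, b) List.mem_cons_self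
    have hM7 := (List.pairwise_cons.1 h7).2
    have hM6 := (List.pairwise_cons.1 h7).1
    have key : ∀ x, a ≤ x → x ≤ prev → ∃ p, p ∈ K ∧ p.1 ≤ x ∧ x ≤ p.2 := by
      intro x hax hxp
      rcases h5 with rfl | ⟨p, hp, hpe⟩
      · omega
      · exact ⟨p, hp, le_trans (h6 p hp (a, b) List.mem_cons_self) hax, by omega⟩
    simp only [List.foldl_cons]
    have res := ih (K ++ [(a, b)]) (out ++ PySem.List.pyRange (max a (prev + 1)) (b + 1) 1)
        (max prev b) ?_ ?_ ?_ ?_ ?_ ?_ hM7 (fun p hp => h8 p (List.mem_cons_of_mem _ hp))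
    · refine ⟨res.1, fun x => ?_⟩
      rw [res.2 x]
      constructor
      · rintro ⟨p, hp, hx1, hx2⟩
        refine ⟨p, ?_, hx1, hx2⟩
        simp only [List.append_assoc, List.singleton_append] at hp
        exact hp
      · rintro ⟨p, hp, hx1, hx2⟩
        refine ⟨p, ?_, hx1, hx2⟩
        simp only [List.append_assoc, List.singleton_append]
        exact hp
    · -- pairwise
      rw [List.pairwise_append]
      refine ⟨h1, PySem.List.pairwise_lt_pyRange_one _ _, ?_⟩
      intro x hx y hy
      rw [PySem.List.mem_pyRange_one] at hy
      have := h2 x hx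
      omega
    · -- bound by new prev
      intro x hx
      rcases List.mem_append.1 hx with hx | hx
      · have := h2 x hx; omega
      · rw [PySem.List.mem_pyRange_one] at hx; omega
    · -- membership
      intro x
      rw [List.mem_append, h3 x, PySem.List.mem_pyRange_one]
      constructor
      · rintro (⟨p, hp, hx1, hx2⟩ | hx)
        · exact ⟨p, List.mem_append_left _ hp, hx1, hx2⟩
        · exact ⟨(a, b), List.mem_append_right _ (List.mem_singleton.2 rfl), by omega, by omega⟩
      · rintro ⟨p, hp, hx1, hx2⟩
        rcases List.mem_append.1 hp with hp | hp
        · exact Or.inl ⟨p, hp, hx1, hx2⟩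
        · rcases List.mem_singleton.1 hp with rfl
          dsimp only at hx1 hx2
          by_cases hxp : x ≤ prev
          · exact Or.inl (key x hx1 hxp)
          · exact Or.inr (by omega)
    · -- ends bounded
      intro p hp
      rcases List.mem_append.1 hp with hp | hp
      · have := h4 p hp; omega
      · rcases List.mem_singleton.1 hp with rfl; simp
    · -- witness of new prev
      by_cases hpb : prev ≤ b
      · exact Or.inr ⟨(a, b), List.mem_append_right _ (List.mem_singleton.2 rfl), by simp; omega⟩
      · rcases h5 with rfl | ⟨p, hp, hpe⟩
        · omega
        · exact Or.inr ⟨p, List.mem_append_left _ hp, by omega⟩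
    · -- starts below upcoming
      intro p hp q hq
      rcases List.mem_append.1 hp with hp | hp
      · exact h6 p hp q (List.mem_cons_of_mem _ hq)
      · rcases List.mem_singleton.1 hp with rfl
        exact hM6 q hq

-- ===== VERDICT (by name: the statement is the Claim_ definition above) =====
theorem parse_episode_selection_spec : Claim_equal_parse_episode_selection := by
  unfold Claim_equal_parse_episode_selection Spec_parse_episode_selection
  intro text max_ep _
  unfold parse_episode_selection parse_episode_selection_alt
  by_cases hg : PySem.Str.lower (PySem.Str.strip text) = "" ∨
      PySem.Str.lower (PySem.Str.strip text) ∈ (["tutto", "all", "tutti", "*"] : List String)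
  · rw [if_pos hg, if_pos hg]
  · rw [if_neg hg, if_neg hg]
    obtain ⟨hnd, hmem, hwf⟩ := pvAccum_inv max_ep
      ((PySem.Str.split? (PySem.Str.replace (PySem.Str.lower (PySem.Str.strip text)) " " "") ",").getD [])
      PySem.Set.empty [] List.nodup_nil (by intro x; simp [PySem.Set.empty]) (by intro p hp; simp at hp)
    have hMp : (PySem.List.sorted
        (((PySem.Str.split? (PySem.Str.replace (PySem.Str.lower (PySem.Str.strip text)) " " "") ",").getD []).foldl
          (fun acc part =>
            match pvPartInterval (PySem.Str.strip part) max_ep with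
            | some iv => acc ++ [iv]
            | none => acc) ([] : List (Int × Int)))
        (fun iv => iv.1) false).Pairwise (fun p q => p.1 ≤ q.1) := PySem.List.sorted_pairwise _ _
    have hMmem := (PySem.List.sorted_perm (xs :=
        (((PySem.Str.split? (PySem.Str.replace (PySem.Str.lower (PySem.Str.strip text)) " " "") ",").getD []).foldl
          (fun acc part =>
            match pvPartInterval (PySem.Str.strip part) max_ep with
            | some iv => acc ++ [iv]
            | none => acc) ([] : List (Int × Int))))
        (key := fun iv => iv.1) (rev := false))
    obtain ⟨hswp, hswm⟩ := pvSweep_inv _ [] [] (-1)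
      List.Pairwise.nil (by intro x hx; simp at hx) (by intro x; simp) (by intro p hp; simp at hp)
      (Or.inl rfl) (by intro p hp; simp at hp) hMp
      (fun p hp => hwf p (hMmem.mem_iff.1 hp))
    apply PySem.List.sorted_eq_of_perm_of_pairwise_lt
    · rw [List.perm_ext_iff_of_nodup (hswp.imp (fun h => ne_of_lt h)) hnd]
      intro x
      rw [hswm x, hmem x]
      constructor
      · rintro ⟨p, hp, hx⟩
        rw [List.nil_append] at hp
        exact ⟨p, hMmem.mem_iff.1 hp, hx⟩
      · rintro ⟨p, hp, hx⟩
        exact ⟨p, by rw [List.nil_append]; exact hMmem.mem_iff.2 hp, hx⟩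
    · exact hswp
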